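-- pv_equiv track=rewrite | github.com/ldfritz/koha-scrape | parse.py | book_summary
-- ===== SOURCE A (Python) =====
-- def book_summary(books):
--     summary = ''
--     cur_date = ''
--     for due_date, call_number, title in sorted(books):
--         if cur_date != due_date:
--             cur_date = due_date
--             summary += cur_date + "\n"
--         summary += '    {:20}  {}\n'.format(call_number, title)
--     summary += '\n{} items'.format(len(books))
--     return summary
-- ===== SOURCE B (Python) =====
-- def book_summary(books):
--     # Group the sorted rows into consecutive runs by due date, then emit
--     # header + lines per group, collecting parts and joining once.
--     groups = []
--     for row in sorted(books):
--         if groups and groups[-1][0] == row[0]: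
--             groups[-1][1].append(row)
--         else:
--             groups.append((row[0], [row]))
--     parts = []
--     for date, rows in groups:
--         if date:
--             parts.append(date + '\n')
--         for _, call_number, title in rows:
--             parts.append('    {:20}  {}\n'.format(call_number, title))
--     parts.append('\n{} items'.format(len(books)))
--     return ''.join(parts)
-- ===== Notes on version B (the rewrite author's own statement) =====
-- stated objective: alternative
-- what changed: Replaces the inline cur_date state machine with string += by an explicit two-phase group-then-emit: first partition the sorted rows into consecutive runs by due date, then a two-level loop emits a header (skipped for an empty date) and the lines of each group into a parts list joined once.
import Mathlib
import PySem

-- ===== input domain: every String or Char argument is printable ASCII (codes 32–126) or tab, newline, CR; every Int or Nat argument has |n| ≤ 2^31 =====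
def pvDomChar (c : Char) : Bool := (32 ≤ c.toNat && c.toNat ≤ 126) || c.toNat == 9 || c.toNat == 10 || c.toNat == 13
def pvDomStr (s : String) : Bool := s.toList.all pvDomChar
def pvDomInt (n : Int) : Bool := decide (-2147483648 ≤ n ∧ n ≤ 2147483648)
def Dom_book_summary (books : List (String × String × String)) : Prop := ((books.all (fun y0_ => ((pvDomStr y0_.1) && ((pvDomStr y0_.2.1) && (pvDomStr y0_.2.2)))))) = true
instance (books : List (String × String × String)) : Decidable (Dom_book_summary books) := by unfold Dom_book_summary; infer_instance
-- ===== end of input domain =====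

-- B replaces A's inline cur_date state machine (string +=) by a two-phase group-then-emit
-- over the same sorted rows (alternative decomposition; same asymptotic cost).


-- ===== PORT A =====
-- Python tuple '<' on (String × String × String) (lexicographic); exact: Lean String '<' is
-- Python's code-point str comparison (PYSEM).
def tlt (a b : String × String × String) : Bool :=
  decide (a.1 < b.1) || (decide (a.1 = b.1) && (decide (a.2.1 < b.2.1) || (decide (a.2.1 = b.2.1) && decide (a.2.2 < b.2.2))))

-- hand port of sorted(books): insertion sort with the tuple comparator; exact: stable, and
-- tlt-ties are equal tuples, so the order agrees with Python's stable sort.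
def insLex (x : String × String × String) : List (String × String × String) → List (String × String × String)
  | [] => [x]
  | y :: t => if tlt x y then x :: y :: t else y :: insLex x t

def pySortBooks (xs : List (String × String × String)) : List (String × String × String) :=
  xs.foldl (fun acc x => insLex x acc) []

-- '    {:20}  {}\n'.format(call_number, title): left-justify to width 20 (exact: ASCII-free of
-- wide graphemes is irrelevant here — Python pads by character count, as does this).
def fmtLine (cn title : String) : List Char :=
  "    ".toList ++ cn.toList ++ List.replicate (20 - cn.toList.length) ' ' ++ "  ".toList ++ title.toList ++ ['\n']

def book_summary (books : List (String × String × String)) : String :=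
  let st := (pySortBooks books).foldl
    (fun (acc : List Char × String) b =>
      let acc2 := if acc.2 ≠ b.1 then (acc.1 ++ b.1.toList ++ ['\n'], b.1) else acc
      (acc2.1 ++ fmtLine b.2.1 b.2.2, acc2.2))
    ([], "")
  String.ofList (st.1 ++ ['\n'] ++ (PySem.Int.toStr (books.length : Int)).toList ++ " items".toList)

-- ===== PORT B =====
-- groups[-1][0] == row[0] check-and-append of Source B, as structural recursion on the group list
def addRow (gs : List (String × List (String × String × String))) (row : String × String × String) :
    List (String × List (String × String × String)) :=
  match gs with
  | [] => [(row.1, [row])]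
  | [g] => if g.1 = row.1 then [(g.1, g.2 ++ [row])] else [g, (row.1, [row])]
  | g :: rest => g :: addRow rest row

-- the parts appended for one (date, rows) group of Source B
def groupParts (g : String × List (String × String × String)) : List (List Char) :=
  (if g.1 ≠ "" then [g.1.toList ++ ['\n']] else []) ++ g.2.map (fun r => fmtLine r.2.1 r.2.2)

def book_summary_alt (books : List (String × String × String)) : String :=
  let groups := (pySortBooks books).foldl addRow []
  let parts := groups.foldl (fun acc g => acc ++ groupParts g) []
  let parts := parts ++ [['\n'] ++ (PySem.Int.toStr (books.length : Int)).toList ++ " items".toList]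
  String.ofList (PySem.Chars.join [] parts)

-- ===== PRECONDITION & SPEC =====
def Spec_book_summary (books : List (String × String × String)) (out : String) : Prop := out = book_summary_alt books
instance (books : List (String × String × String)) (out : String) : Decidable (Spec_book_summary books out) := by unfold Spec_book_summary; infer_instance

-- ===== CLAIM (what is proved, stated in full; the proofs are below) =====
def Claim_equal_book_summary : Prop := ∀ (books : List (String × String × String)), Dom_book_summary books → Spec_book_summary books (book_summary books)

-- ===== LEMMAS AND PROOFS =====

-- what A's loop emits, as a recursion
def emitA : String → List (String × String × String) → List Char
  | _, [] => []
  | cur, b :: r => (if cur ≠ b.1 then b.1.toList ++ ['\n'] else []) ++ fmtLine b.2.1 b.2.2 ++ emitA b.1 r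

-- key of the last group ("" when there is none)
def lastKey : List (String × List (String × String × String)) → String
  | [] => ""
  | [g] => g.1
  | _ :: rest => lastKey rest

-- everything B's group loop emits
def emitG (gs : List (String × List (String × String × String))) : List Char :=
  (gs.flatMap groupParts).flatten

theorem tlt_iff (a b : String × String × String) :
    tlt a b = true ↔ a.1 < b.1 ∨ (a.1 = b.1 ∧ (a.2.1 < b.2.1 ∨ (a.2.1 = b.2.1 ∧ a.2.2 < b.2.2))) := by
  simp [tlt]

theorem tlt_asymm {x y : String × String × String} (h : tlt x y = true) : tlt y x = false := by
  rw [tlt_iff] at h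
  rw [Bool.eq_false_iff, Ne, tlt_iff]
  rcases h with h1 | ⟨he, h2 | ⟨he2, h3⟩⟩ <;>
    rintro (g1 | ⟨ge, g2 | ⟨ge2, g3⟩⟩) <;> simp_all <;> first | exact absurd g1 (asymm h1) | exact absurd g2 (asymm h2) | exact absurd g3 (asymm h3)

theorem tlt_trans_le {x y z : String × String × String} (h : tlt x y = true) (h2 : tlt z y = false) :
    tlt z x = false := by
  rw [tlt_iff] at h
  rw [Bool.eq_false_iff, Ne, tlt_iff] at h2 ⊢
  intro g; apply h2
  rcases h with h1 | ⟨he, hrest⟩ <;> rcases g with g1 | ⟨ge, grest⟩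
  · exact Or.inl (lt_trans g1 h1)
  · exact Or.inl (ge ▸ h1)
  · exact Or.inl (he ▸ g1)
  · rcases hrest with h2' | ⟨he2, h3⟩ <;> rcases grest with g2 | ⟨ge2, g3⟩
    · exact Or.inr ⟨ge.trans he, Or.inl (lt_trans g2 h2')⟩
    · exact Or.inr ⟨ge.trans he, Or.inl (ge2 ▸ h2')⟩
    · exact Or.inr ⟨ge.trans he, Or.inl (he2 ▸ g2)⟩
    · exact Or.inr ⟨ge.trans he, Or.inr ⟨ge2.trans he2, lt_trans g3 h3⟩⟩

theorem mem_insLex {x z : String × String × String} {l : List (String × String × String)}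
    (h : z ∈ insLex x l) : z = x ∨ z ∈ l := by
  induction l with
  | nil => simpa [insLex] using h
  | cons y t ih =>
    simp only [insLex] at h
    split at h
    · rw [List.mem_cons, List.mem_cons] at h
      rw [List.mem_cons]
      tauto
    · rw [List.mem_cons] at h
      rw [List.mem_cons]
      rcases h with rfl | h
      · tauto
      · rcases ih h with h' | h' <;> tauto

theorem pairwise_insLex {x : String × String × String} {l : List (String × String × String)}
    (h : l.Pairwise (fun a b => tlt b a = false)) :
    (insLex x l).Pairwise (fun a b => tlt b a = false) := by
  induction l with
  | nil => simp [insLex]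
  | cons y t ih =>
    rcases List.pairwise_cons.mp h with ⟨hy, ht⟩
    simp only [insLex]
    split
    · rename_i hxy
      refine List.pairwise_cons.mpr ⟨?_, h⟩
      intro z hz
      rcases hz with _ | hz
      · exact tlt_asymm hxy
      · exact tlt_trans_le hxy (hy z (by assumption))
    · rename_i hxy
      refine List.pairwise_cons.mpr ⟨?_, ih ht⟩
      intro z hz
      rcases mem_insLex hz with rfl | hz
      · exact Bool.eq_false_iff.mpr (fun hc => hxy hc)
      · exact hy z hz

theorem pairwise_pySortBooks (xs : List (String × String × String)) :
    (pySortBooks xs).Pairwise (fun a b => tlt b a = false) := by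
  have : ∀ acc, acc.Pairwise (fun a b => tlt b a = false) →
      (xs.foldl (fun acc x => insLex x acc) acc).Pairwise (fun a b => tlt b a = false) := by
    induction xs with
    | nil => intro acc h; simpa
    | cons x t ih => intro acc h; exact ih _ (pairwise_insLex h)
  exact this [] (by simp)

theorem pairwise_fst_pySortBooks (xs : List (String × String × String)) :
    (pySortBooks xs).Pairwise (fun a b => a.1 ≤ b.1) := by
  refine (pairwise_pySortBooks xs).imp ?_
  intro a b h
  by_contra hlt
  rw [Bool.eq_false_iff, Ne, tlt_iff] at h
  exact h (Or.inl (not_le.mp hlt))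

theorem foldA (s : List (String × String × String)) (summary : List Char) (cur : String) :
    (s.foldl
      (fun (acc : List Char × String) b =>
        let acc2 := if acc.2 ≠ b.1 then (acc.1 ++ b.1.toList ++ ['\n'], b.1) else acc
        (acc2.1 ++ fmtLine b.2.1 b.2.2, acc2.2))
      (summary, cur)).1 = summary ++ emitA cur s := by
  induction s generalizing summary cur with
  | nil => simp [emitA]
  | cons b r ih =>
    rw [List.foldl_cons]
    by_cases h : cur = b.1
    · have hstep : (let acc2 := if (summary, cur).2 ≠ b.1 then ((summary, cur).1 ++ b.1.toList ++ ['\n'], b.1) else (summary, cur)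
        ((acc2.1 ++ fmtLine b.2.1 b.2.2, acc2.2) : List Char × String))
          = (summary ++ fmtLine b.2.1 b.2.2, cur) := by simp [h]
      rw [hstep, ih]
      simp [emitA, h]
    · have hstep : (let acc2 := if (summary, cur).2 ≠ b.1 then ((summary, cur).1 ++ b.1.toList ++ ['\n'], b.1) else (summary, cur)
        ((acc2.1 ++ fmtLine b.2.1 b.2.2, acc2.2) : List Char × String))
          = (summary ++ b.1.toList ++ ['\n'] ++ fmtLine b.2.1 b.2.2, b.1) := by simp [h]
      rw [hstep, ih]
      simp [emitA, h, List.append_assoc]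

theorem addRow_ne_nil (gs : List (String × List (String × String × String))) (b : String × String × String) :
    addRow gs b ≠ [] := by
  cases gs with
  | nil => simp [addRow]
  | cons g rest =>
    cases rest with
    | nil => simp only [addRow]; split <;> simp
    | cons g2 rest2 => simp [addRow]

theorem lastKey_addRow (gs : List (String × List (String × String × String))) (b : String × String × String) :
    lastKey (addRow gs b) = b.1 := by
  induction gs with
  | nil => simp [addRow, lastKey]
  | cons g rest ih =>
    cases rest with
    | nil =>
      simp only [addRow]
      split <;> simp_all [lastKey]
    | cons g2 rest2 =>
      show lastKey (g :: addRow (g2 :: rest2) b) = b.1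
      rw [← ih]
      cases h : addRow (g2 :: rest2) b with
      | nil => exact absurd h (addRow_ne_nil _ _)
      | cons a t => rfl

theorem emitG_cons (g : String × List (String × String × String))
    (l : List (String × List (String × String × String))) :
    emitG (g :: l) = (groupParts g).flatten ++ emitG l := by
  simp [emitG]

theorem emitG_addRow (gs : List (String × List (String × String × String))) (b : String × String × String) :
    emitG (addRow gs b) =
      emitG gs ++ (if lastKey gs ≠ b.1 ∧ b.1 ≠ "" then b.1.toList ++ ['\n'] else []) ++ fmtLine b.2.1 b.2.2 := by
  induction gs with
  | nil =>
    by_cases h : b.1 = "" <;>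
      simp [addRow, emitG, groupParts, lastKey, h]
  | cons g rest ih =>
    cases rest with
    | nil =>
      simp only [addRow]
      split
      · rename_i heq
        simp [emitG, groupParts, lastKey, heq, List.append_assoc]
      · rename_i hne
        by_cases h : b.1 = "" <;>
          simp [emitG, groupParts, lastKey, hne, h, List.append_assoc]
    | cons g2 rest2 =>
      show emitG (g :: addRow (g2 :: rest2) b) = _
      rw [emitG_cons, ih]
      simp only [emitG_cons, List.append_assoc]
      rfl

theorem empty_le_string (s : String) : ("" : String) ≤ s := by
  rw [String.le_iff_toList_le]
  show ([] : List Char) ≤ s.toList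
  cases h : s.toList with
  | nil => simp
  | cons c t => exact le_of_lt (List.Lex.nil)

theorem foldG (s : List (String × String × String)) (gs : List (String × List (String × String × String)))
    (hle : ∀ b ∈ s, lastKey gs ≤ b.1) (hp : s.Pairwise (fun a b => a.1 ≤ b.1)) :
    emitG (s.foldl addRow gs) = emitG gs ++ emitA (lastKey gs) s := by
  induction s generalizing gs with
  | nil => simp [emitA]
  | cons b r ih =>
    rcases List.pairwise_cons.mp hp with ⟨hb, hr⟩
    rw [List.foldl_cons, ih (addRow gs b)
      (by intro c hc; rw [lastKey_addRow]; exact hb c hc) hr,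
      emitG_addRow, lastKey_addRow]
    show _ = emitG gs ++ ((if lastKey gs ≠ b.1 then b.1.toList ++ ['\n'] else []) ++ fmtLine b.2.1 b.2.2 ++ emitA b.1 r)
    by_cases h : b.1 = ""
    · have hgs : lastKey gs = "" := le_antisymm (h ▸ hle b (by simp)) (empty_le_string _)
      simp [h, hgs]
    · simp [h, List.append_assoc]

theorem join_nil_eq_flatten (ps : List (List Char)) : PySem.Chars.join [] ps = ps.flatten := by
  induction ps with
  | nil => simp [PySem.Chars.join_nil]
  | cons a t ih =>
    cases t with
    | nil => simp [PySem.Chars.join_singleton]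
    | cons b r => rw [PySem.Chars.join_cons_cons, ih]; simp

-- ===== VERDICT (by name: the statement is the Claim_ definition above) =====
theorem book_summary_spec : Claim_equal_book_summary := by
  intro books _
  unfold Spec_book_summary book_summary book_summary_alt
  simp only [foldA, PySem.List.foldl_append_eq_flatMap, join_nil_eq_flatten, List.flatten_append]
  have hG : (List.flatMap groupParts (List.foldl addRow [] (pySortBooks books))).flatten
      = emitA "" (pySortBooks books) := by
    have := foldG (pySortBooks books) []
      (by intro b _; exact empty_le_string b.1) (pairwise_fst_pySortBooks books)
    simpa [emitG, lastKey] using this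
  rw [hG]
  simp
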